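-- pv_equiv track=rewrite | github.com/Jordan231111/CodeForce-Solutions | Codeforces Round 1029 (Div. 3)/C_Cool_Partition.py | solve_case_with_sets
-- ===== SOURCE A (Python) =====
-- def solve_case_with_sets(n, arr):
--     """Fallback for when value range is too large."""
--     if n == 0:
--         return 0
--
--     segments = 0
--     current_pos = 0
--     required_set = set()
--
--     while current_pos < n:
--         segments += 1
--
--         # Make a copy of required elements
--         needed = required_set.copy()
--         current_set = set()
--         valid_segment = False
--
--         for i in range(current_pos, n):
--             current_set.add(arr[i])
--             needed.discard(arr[i])
--
--             if not needed:
--                 valid_segment = True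
--                 current_pos = i + 1
--                 break
--
--         if not valid_segment:
--             segments -= 1
--             break
--
--         required_set = current_set
--
--     return segments
-- ===== SOURCE B (Python) =====
-- def solve_case_with_sets(n, arr):
--     segments = 0
--     start = 0
--     required = set()
--     while start < n:
--         # The segment starting at `start` ends at the furthest first occurrence
--         # (at or after `start`, before n) of any value required from the previous
--         # segment; an empty requirement means the segment is just arr[start].
--         end = start
--         for v in required:
--             try:
--                 j = arr.index(v, start, n)
--             except ValueError:
--                 return segments  # some required value never reappears: drop tail
--             if j > end:
--                 end = j
--         segments += 1
--         required = set(arr[start:end + 1])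
--         start = end + 1
--     return segments
-- ===== Notes on version B (the rewrite author's own statement) =====
-- stated objective: alternative
-- what changed: B replaces A's element-by-element sweep that shrinks a copied 'needed' set until empty by a per-segment computation over the required VALUES: each segment's end is the maximum over the required values of arr.index(v, start, n) (first occurrence at or after start), ValueError meaning the trailing segment is incomplete, and the next requirement is set(arr[start:end+1]).
import Mathlib
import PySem

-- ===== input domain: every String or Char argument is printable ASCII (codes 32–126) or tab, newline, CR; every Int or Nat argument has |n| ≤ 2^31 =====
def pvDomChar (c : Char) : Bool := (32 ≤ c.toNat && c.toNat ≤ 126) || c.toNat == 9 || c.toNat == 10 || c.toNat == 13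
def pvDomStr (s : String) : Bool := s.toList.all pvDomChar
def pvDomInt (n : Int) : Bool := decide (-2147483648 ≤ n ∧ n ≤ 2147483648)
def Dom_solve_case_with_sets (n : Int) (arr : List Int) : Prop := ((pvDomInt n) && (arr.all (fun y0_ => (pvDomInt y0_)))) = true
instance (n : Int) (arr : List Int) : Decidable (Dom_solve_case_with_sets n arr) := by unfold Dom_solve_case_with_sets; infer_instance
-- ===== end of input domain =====

-- B finds each segment's end as the maximum over the required values of the first
-- occurrence index arr.index(v, start, n), instead of A's sweep that shrinks a
-- copied 'needed' set element by element (objective: alternative).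

-- ===== PORT A =====
-- inner for-loop of A: walk the remaining index list, growing current_set and
-- shrinking needed; `some (current_set, rest)` = break at index i with rest the
-- indices after i (i.e. range(i+1, n)); `none` = loop exhausted without break.
def pvInnerA (arr : List Int) : List Int → PySem.Set Int → PySem.Set Int → Option (PySem.Set Int × List Int)
  | [], _, _ => none
  | i :: rest, needed, cur =>
    let x := PySem.List.pyGetD arr i 0   -- arr[i]; Pre_ keeps every index in range
    let cur' := PySem.Set.add cur x
    let needed' := PySem.Set.discard needed x
    if needed' = [] then some (cur', rest) else pvInnerA arr rest needed' cur'

-- termination fact for A's outer while: a successful inner loop consumes ≥ 1 index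
theorem pvInnerA_length_lt (arr : List Int) : ∀ (idxs : List Int) (needed cur : PySem.Set Int)
    (r : PySem.Set Int × List Int), pvInnerA arr idxs needed cur = some r → r.2.length < idxs.length := by
  intro idxs
  induction idxs with
  | nil => intro needed cur r h; simp [pvInnerA] at h
  | cons i rest ih =>
    intro needed cur r h
    simp only [pvInnerA] at h
    split at h
    · cases h; simp
    · exact Nat.lt_trans (ih _ _ _ h) (Nat.lt_succ_self _)

-- outer while-loop of A: each round copies required_set into needed, runs the inner
-- loop with a fresh current_set; on break, segments += 1 and required_set := current_set;
-- otherwise (valid_segment False) the final segments += 1 / -= 1 cancel: return segments.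
def pvOuterA (arr : List Int) (idxs : List Int) (required : PySem.Set Int) (segments : Int) : Int :=
  match h : pvInnerA arr idxs required [] with
  | none => segments
  | some (cur, rest) => pvOuterA arr rest cur (segments + 1)
termination_by idxs.length
decreasing_by exact pvInnerA_length_lt arr idxs required [] _ h

def solve_case_with_sets (n : Int) (arr : List Int) : Int :=
  if n = 0 then 0
  else pvOuterA arr (PySem.List.pyRange 0 n 1) [] 0

-- ===== PORT B =====
-- arr.index(v, p, n): first j in [p, n) with arr[j] = v, none = ValueError.
-- Exact for 0 ≤ p and n ≤ len(arr) — the only way Source B calls it under Pre_.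
def pvIdxIn (arr : List Int) (v : Int) (p n : Int) : Option Int :=
  if _h : p < n then
    if PySem.List.pyGetD arr p 0 = v then some p else pvIdxIn arr v (p + 1) n
  else none
termination_by (n - p).toNat
decreasing_by omega

-- Source B's `for v in required:` loop: running maximum `end` (init start), early
-- None on the first ValueError.  (max / None do not depend on set order.)
def pvSegEnd (arr : List Int) (p n : Int) : List Int → Int → Option Int
  | [], e => some e
  | v :: vs, e =>
    match pvIdxIn arr v p n with
    | none => none
    | some j => pvSegEnd arr p n vs (if j > e then j else e)

-- termination fact for B's while loop: the accumulator only grows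
theorem pvSegEnd_ge (arr : List Int) (p n : Int) : ∀ (vs : List Int) (a e : Int),
    pvSegEnd arr p n vs a = some e → a ≤ e := by
  intro vs
  induction vs with
  | nil => intro a e h; cases h; omega
  | cons v tl ih =>
    intro a e h
    simp only [pvSegEnd] at h
    split at h
    · exact absurd h (by simp)
    · next j _ => have := ih _ _ h; split at this <;> omega

-- Source B's while loop: state (start, required, segments)
def pvOuterB (arr : List Int) (n p : Int) (req : PySem.Set Int) (seg : Int) : Int :=
  if _h : p < n then
    match he : pvSegEnd arr p n req p with
    | none => seg
    | some e =>
      pvOuterB arr n (e + 1) (PySem.Set.ofList (PySem.List.slice arr (some p) (some (e + 1)))) (seg + 1)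
  else seg
termination_by (n - p).toNat
decreasing_by have := pvSegEnd_ge arr p n req p e he; omega

def solve_case_with_sets_alt (n : Int) (arr : List Int) : Int :=
  pvOuterB arr n 0 PySem.Set.empty 0

-- ===== PRECONDITION & SPEC =====
-- Pre_ excludes exactly the inputs where A raises IndexError: whenever 1 ≤ n and
-- n > len(arr), A eventually reads arr[len(arr)].
def Pre_solve_case_with_sets (n : Int) (arr : List Int) : Prop := n ≤ (arr.length : Int)
instance (n : Int) (arr : List Int) : Decidable (Pre_solve_case_with_sets n arr) := by
  unfold Pre_solve_case_with_sets; infer_instance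

def pvWitness_solve_case_with_sets : Int × List Int := (4, [1, 2, 1, 3])

def Spec_solve_case_with_sets (n : Int) (arr : List Int) (out : Int) : Prop := out = solve_case_with_sets_alt n arr
instance (n : Int) (arr : List Int) (out : Int) : Decidable (Spec_solve_case_with_sets n arr out) := by unfold Spec_solve_case_with_sets; infer_instance

-- ===== CLAIM (what is proved, stated in full; the proofs are below) =====
def Claim_equal_solve_case_with_sets : Prop := ∀ (n : Int) (arr : List Int), Dom_solve_case_with_sets n arr → Pre_solve_case_with_sets n arr → Spec_solve_case_with_sets n arr (solve_case_with_sets n arr)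

-- ===== LEMMAS AND PROOFS =====

-- pvIdxIn hit / miss unfoldings
theorem pvIdxIn_hit (arr : List Int) (v p n : Int) (hpn : p < n)
    (hx : PySem.List.pyGetD arr p 0 = v) : pvIdxIn arr v p n = some p := by
  rw [pvIdxIn]; simp [hpn, hx]

theorem pvIdxIn_miss (arr : List Int) (v p n : Int) (hpn : p < n)
    (hx : PySem.List.pyGetD arr p 0 ≠ v) : pvIdxIn arr v p n = pvIdxIn arr v (p + 1) n := by
  rw [pvIdxIn]; simp [hpn, hx]

theorem pvIdxIn_none_of_ge (arr : List Int) (v p n : Int) (h : ¬ p < n) :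
    pvIdxIn arr v p n = none := by
  rw [pvIdxIn]; simp [h]

-- any index returned lies in [p, n)
theorem pvIdxIn_bounds (arr : List Int) (v : Int) : ∀ (p n j : Int),
    pvIdxIn arr v p n = some j → p ≤ j ∧ j < n := by
  intro p n j h
  fun_induction pvIdxIn arr v p n with
  | case1 p _h hx => cases h; omega
  | case2 p _h hx ih => have := ih h; omega
  | case3 p _h => simp at h

-- a returned segment end lies below n (the accumulator starts below n)
theorem pvSegEnd_lt (arr : List Int) (p n : Int) : ∀ (vs : List Int) (a e : Int),
    a < n → pvSegEnd arr p n vs a = some e → e < n := by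
  intro vs
  induction vs with
  | nil => intro a e ha h; cases h; omega
  | cons v tl ih =>
    intro a e ha h
    simp only [pvSegEnd] at h
    split at h
    · exact absurd h (by simp)
    · next j hj =>
      have hb := (pvIdxIn_bounds arr v p n j hj).2
      exact ih _ _ (by split <;> omega) h

-- the accumulator is irrelevant below the scan start, on a nonempty value list
theorem pvSegEnd_cons_shift (arr : List Int) (q n : Int) (v : Int) (tl : List Int)
    (a b : Int) (ha : a ≤ q) (hb : b ≤ q) :
    pvSegEnd arr q n (v :: tl) a = pvSegEnd arr q n (v :: tl) b := by
  simp only [pvSegEnd]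
  cases hj : pvIdxIn arr v q n with
  | none => rfl
  | some j =>
    have hq := (pvIdxIn_bounds arr v q n j hj).1
    have h1 : (if j > a then j else a) = j := by split <;> omega
    have h2 : (if j > b then j else b) = j := by split <;> omega
    dsimp only
    rw [h1, h2]

-- one scan step: looking up all of `vs` from p equals dropping the matches of
-- arr[p] and looking the rest up from p+1 (the accumulator p walks along)
theorem pvSegEnd_step (arr : List Int) (p n : Int) (hpn : p < n) : ∀ (vs : List Int) (a : Int),
    p ≤ a → pvSegEnd arr p n vs a
      = pvSegEnd arr (p + 1) n (PySem.Set.discard vs (PySem.List.pyGetD arr p 0)) a := by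
  intro vs
  induction vs with
  | nil => intro a _; rfl
  | cons v tl ih =>
    intro a hpa
    by_cases hv : PySem.List.pyGetD arr p 0 = v
    · have hd : PySem.Set.discard (v :: tl) (PySem.List.pyGetD arr p 0)
          = PySem.Set.discard tl (PySem.List.pyGetD arr p 0) := by
        simp [PySem.Set.discard, hv.symm]
      rw [hd]
      simp only [pvSegEnd, pvIdxIn_hit arr v p n hpn hv]
      have hacc : (if p > a then p else a) = a := by split <;> omega
      rw [hacc]
      exact ih a hpa
    · have hd : PySem.Set.discard (v :: tl) (PySem.List.pyGetD arr p 0)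
          = v :: PySem.Set.discard tl (PySem.List.pyGetD arr p 0) := by
        simp [PySem.Set.discard, Ne.symm hv]
      rw [hd]
      simp only [pvSegEnd, pvIdxIn_miss arr v p n hpn hv]
      cases hj : pvIdxIn arr v (p + 1) n with
      | none => rfl
      | some j =>
        have hb := (pvIdxIn_bounds arr v (p + 1) n j hj).1
        exact ih _ (by split <;> omega)

-- BRIDGE: A's inner sweep from p with needed-set `needed` is governed by B's
-- max-of-first-occurrences pvSegEnd: None = no break; some e = break at index e,
-- with current_set = cur extended by the values arr[p..e].
theorem pvBridge (arr : List Int) (nn : Int) : ∀ (k : Nat) (p : Int) (needed cur : PySem.Set Int),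
    (nn - p).toNat ≤ k → p < nn →
    (pvSegEnd arr p nn needed p = none →
        pvInnerA arr (PySem.List.pyRange p nn 1) needed cur = none) ∧
    (∀ e, pvSegEnd arr p nn needed p = some e →
        pvInnerA arr (PySem.List.pyRange p nn 1) needed cur =
          some (List.foldl PySem.Set.add cur
                  ((PySem.List.pyRange p (e + 1) 1).map (fun i => PySem.List.pyGetD arr i 0)),
                PySem.List.pyRange (e + 1) nn 1)) := by
  intro k
  induction k with
  | zero => intro p needed cur hk hpn; omega
  | succ k ih =>
    intro p needed cur hk hpn
    rw [PySem.List.pyRange_one_cons hpn]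
    have hstep := pvSegEnd_step arr p nn hpn needed p le_rfl
    by_cases hne : PySem.Set.discard needed (PySem.List.pyGetD arr p 0) = []
    · -- A's sweep breaks immediately at index p
      have hseg : pvSegEnd arr p nn needed p = some p := by
        rw [hstep, hne]; rfl
      refine ⟨fun h => ?_, fun e he => ?_⟩
      · rw [hseg] at h; exact absurd h (by simp)
      · rw [hseg] at he
        cases he
        simp only [pvInnerA]
        rw [if_pos hne, PySem.List.pyRange_one_singleton]
        rfl
    · obtain ⟨v, tl, hvtl⟩ := List.exists_cons_of_ne_nil hne
      have hseg : pvSegEnd arr p nn needed p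
          = pvSegEnd arr (p + 1) nn (PySem.Set.discard needed (PySem.List.pyGetD arr p 0)) (p + 1) := by
        rw [hstep, hvtl]
        exact pvSegEnd_cons_shift arr (p + 1) nn v tl p (p + 1) (by omega) le_rfl
      have hinner : pvInnerA arr (p :: PySem.List.pyRange (p + 1) nn 1) needed cur
          = pvInnerA arr (PySem.List.pyRange (p + 1) nn 1)
              (PySem.Set.discard needed (PySem.List.pyGetD arr p 0))
              (PySem.Set.add cur (PySem.List.pyGetD arr p 0)) := by
        simp only [pvInnerA]
        rw [if_neg hne]
      by_cases hp1 : p + 1 < nn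
      · have IH := ih (p + 1) (PySem.Set.discard needed (PySem.List.pyGetD arr p 0))
          (PySem.Set.add cur (PySem.List.pyGetD arr p 0)) (by omega) hp1
        refine ⟨fun h => ?_, fun e he => ?_⟩
        · rw [hseg] at h
          rw [hinner]
          exact IH.1 h
        · rw [hseg] at he
          have hpe : p < e + 1 := by
            have := pvSegEnd_ge arr (p + 1) nn _ _ _ he; omega
          rw [hinner, IH.2 e he, PySem.List.pyRange_one_cons hpe]
          rfl
      · -- p + 1 = nn: the remaining range is empty and every lookup from p+1 fails
        have hnil : PySem.List.pyRange (p + 1) nn 1 = [] :=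
          PySem.List.pyRange_one_eq_nil (by omega)
        have hsegn : pvSegEnd arr p nn needed p = none := by
          rw [hseg, hvtl]
          simp only [pvSegEnd]
          rw [pvIdxIn_none_of_ge arr v (p + 1) nn hp1]
        refine ⟨fun _ => ?_, fun e he => ?_⟩
        · rw [hinner, hnil]; rfl
        · rw [hsegn] at he; exact absurd he (by simp)

-- the slice arr[a:b] lists exactly the values arr[i] for i in range(a, b)
theorem pvSliceVals (arr : List Int) : ∀ (a b : Int), 0 ≤ a → a ≤ b → b ≤ (arr.length : Int) →
    PySem.List.slice arr (some a) (some b)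
      = (PySem.List.pyRange a b 1).map (fun i => PySem.List.pyGetD arr i 0) := by
  intro a b ha hab hb
  have hsplit : PySem.List.pyRange a (arr.length : Int) 1
      = PySem.List.pyRange a b 1 ++ PySem.List.pyRange b (arr.length : Int) 1 :=
    PySem.List.pyRange_one_append a b (arr.length : Int) hab hb
  have hfull := PySem.List.map_pyGetD_pyRange' arr (0 : Int) ha
  rw [hsplit, List.map_append, PySem.List.map_pyGetD_pyRange' arr (0 : Int) (le_trans ha hab)] at hfull
  have hlen : ((PySem.List.pyRange a b 1).map (fun i => PySem.List.pyGetD arr i 0)).length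
      = b.toNat - a.toNat := by
    rw [List.length_map, PySem.List.length_pyRange_one]; omega
  have := congrArg (fun l => List.take (b.toNat - a.toNat) l) hfull
  simp only at this
  rw [← hlen, List.take_left] at this
  rw [PySem.List.slice_toNat arr ha (by omega), this, hlen]

-- A's outer while-loop equals B's outer while-loop
theorem pvOuter_eq (arr : List Int) (nn : Int) (hlen : nn ≤ (arr.length : Int)) :
    ∀ (k : Nat) (p : Int) (req : PySem.Set Int) (seg : Int), 0 ≤ p → (nn - p).toNat ≤ k →
    pvOuterA arr (PySem.List.pyRange p nn 1) req seg = pvOuterB arr nn p req seg := by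
  intro k
  induction k with
  | zero =>
    intro p req seg hp hk
    have hpn : ¬ p < nn := by omega
    rw [pvOuterA, pvOuterB, dif_neg hpn, PySem.List.pyRange_one_eq_nil (by omega)]
    rfl
  | succ k ih =>
    intro p req seg hp hk
    by_cases hpn : p < nn
    · have hb := pvBridge arr nn (k + 1) p req [] hk hpn
      rw [pvOuterA, pvOuterB, dif_pos hpn]
      cases hseg : pvSegEnd arr p nn req p with
      | none =>
        rw [hb.1 hseg]
      | some e =>
        have hge : p ≤ e := pvSegEnd_ge arr p nn req p e hseg
        have hlt : e < nn := pvSegEnd_lt arr p nn req p e hpn hseg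
        rw [hb.2 e hseg]
        dsimp only
        rw [← pvSliceVals arr p (e + 1) hp (by omega) (by omega)]
        rw [PySem.Set.ofList_eq_foldl]
        exact ih (e + 1) _ (seg + 1) (by omega) (by omega)
    · rw [pvOuterA, pvOuterB, dif_neg hpn, PySem.List.pyRange_one_eq_nil (by omega)]
      rfl

-- ===== VERDICT (by name: the statement is the Claim_ definition above) =====
theorem solve_case_with_sets_spec : Claim_equal_solve_case_with_sets := by
  intro n arr _ hpre
  unfold Spec_solve_case_with_sets solve_case_with_sets solve_case_with_sets_alt
  by_cases hn : n = 0
  · subst hn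
    rw [pvOuterB]
    norm_num
  · rw [if_neg hn]
    exact pvOuter_eq arr n hpre (n - 0).toNat 0 PySem.Set.empty 0 le_rfl le_rfl
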